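-- pv_equiv track=rewrite | github.com/vadim-vj/wh | syllabuses/cs/problems/cracking-the-code/_.py | cracking_the_code
-- ===== SOURCE A (Python) =====
-- def cracking_the_code(pin):
--     count = 0
--
--     for i in range(100):
--         for c in range(ord('a'), ord('z') + 1):
--             count += 1
--
--             if pin == chr(c) + f'{i:02d}':
--                 return count
--
--     return count
-- ===== SOURCE B (Python) =====
-- def cracking_the_code(pin):
--     if len(pin) == 3 and 'a' <= pin[0] <= 'z' and '0' <= pin[1] <= '9' and '0' <= pin[2] <= '9':
--         return ((ord(pin[1]) - 48) * 10 + (ord(pin[2]) - 48)) * 26 + (ord(pin[0]) - 96)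
--     return 2600
-- ===== Notes on version B (the rewrite author's own statement) =====
-- stated objective: faster
-- what changed: Replaces A's 2600-iteration nested scan over all letter+two-digit candidates with a direct O(1) decode of the pin (letter and zero-padded digits map straight to the 1-based count; anything else returns the fall-through count 2600).
import Mathlib
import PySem

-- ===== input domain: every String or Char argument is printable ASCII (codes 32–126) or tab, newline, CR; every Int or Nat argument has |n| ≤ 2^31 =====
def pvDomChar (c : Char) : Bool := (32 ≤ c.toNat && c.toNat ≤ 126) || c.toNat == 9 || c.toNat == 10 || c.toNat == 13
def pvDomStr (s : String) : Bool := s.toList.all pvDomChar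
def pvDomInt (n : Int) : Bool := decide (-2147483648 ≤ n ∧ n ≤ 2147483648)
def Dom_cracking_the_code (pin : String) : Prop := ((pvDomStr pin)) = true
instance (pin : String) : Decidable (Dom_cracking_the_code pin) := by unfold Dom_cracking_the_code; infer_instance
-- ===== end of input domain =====

-- B replaces A's 2600-iteration double scan by directly decoding the pin (letter + two digits)
-- into its 1-based position, returning the fall-through count 2600 on any non-matching string.

-- ===== PORT A =====
-- f'{i:02d}', exact for the loop's 0 ≤ i < 100 (str(i) is one or two digits there, padded to 2)
def pvPad2 (i : Int) : List Char :=
  let s := PySem.Int.toChars i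
  if s.length < 2 then '0' :: s else s

-- chr(c) + f'{i:02d}' as its character list (string equality tested on .toList; String.toList is injective)
def pvCand (i c : Int) : List Char :=
  Char.ofNat c.toNat :: pvPad2 i

-- the inner 'for c in range(97, 123)' loop: Sum.inl = early return, Sum.inr = fall through with the count
def pvInner (pin : List Char) (i : Int) (count : Int) : List Int → Sum Int Int
  | [] => Sum.inr count
  | c :: rest =>
      let count := count + 1
      if pin = pvCand i c then Sum.inl count else pvInner pin i count rest

-- the outer 'for i in range(100)' loop
def pvOuter (pin : List Char) (count : Int) : List Int → Int
  | [] => count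
  | i :: rest =>
      match pvInner pin i count (PySem.List.pyRange 97 123 1) with
      | Sum.inl r => r
      | Sum.inr count' => pvOuter pin count' rest

def cracking_the_code (pin : String) : Int :=
  pvOuter pin.toList 0 (PySem.List.pyRange 0 100 1)

-- ===== PORT B =====
def cracking_the_code_alt (pin : String) : Int :=
  match pin.toList with
  | [a, b, d] =>
      if 'a' ≤ a ∧ a ≤ 'z' ∧ '0' ≤ b ∧ b ≤ '9' ∧ '0' ≤ d ∧ d ≤ '9' then
        (((b.toNat : Int) - 48) * 10 + ((d.toNat : Int) - 48)) * 26 + ((a.toNat : Int) - 96)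
      else 2600
  | _ => 2600

-- ===== PRECONDITION & SPEC =====
def Spec_cracking_the_code (pin : String) (out : Int) : Prop := out = cracking_the_code_alt pin
instance (pin : String) (out : Int) : Decidable (Spec_cracking_the_code pin out) := by unfold Spec_cracking_the_code; infer_instance

-- ===== CLAIM (what is proved, stated in full; the proofs are below) =====
def Claim_equal_cracking_the_code : Prop := ∀ (pin : String), Dom_cracking_the_code pin → Spec_cracking_the_code pin (cracking_the_code pin)

-- ===== LEMMAS AND PROOFS =====

theorem pv_char_le_iff {x y : Char} : x ≤ y ↔ x.toNat ≤ y.toNat := by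
  simp only [Char.le_def, UInt32.le_iff_toNat_le, Char.toNat_val]

theorem pv_char_eq_of_toNat_eq {x y : Char} (h : x.toNat = y.toNat) : x = y := by
  rw [← Char.ofNat_toNat x, h, Char.ofNat_toNat]

theorem pv_ge_48 {b : Char} (h : '0' ≤ b) : 48 ≤ b.toNat := by
  have := pv_char_le_iff.mp h; simpa using this

theorem pv_le_57 {b : Char} (h : b ≤ '9') : b.toNat ≤ 57 := by
  have := pv_char_le_iff.mp h; simpa using this

theorem pv_ge_97 {a : Char} (h : 'a' ≤ a) : 97 ≤ a.toNat := by
  have := pv_char_le_iff.mp h; simpa using this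

theorem pv_le_122 {a : Char} (h : a ≤ 'z') : a.toNat ≤ 122 := by
  have := pv_char_le_iff.mp h; simpa using this

-- a Bool record of what pvPad2 produces, checked by decide over the whole outer range
def pvPadOK (s : List Char) (i : Int) : Bool :=
  match s with
  | [b, d] => decide ('0' ≤ b) && decide (b ≤ '9') && decide ('0' ≤ d) && decide (d ≤ '9') &&
      (((b.toNat : Int) - 48) * 10 + ((d.toNat : Int) - 48) == i)
  | _ => false

theorem pvPad_ok : ∀ i ∈ PySem.List.pyRange 0 100 1, pvPadOK (pvPad2 i) i = true := by decide

theorem pvChr_ok : ∀ c ∈ PySem.List.pyRange 97 123 1,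
    'a' ≤ Char.ofNat c.toNat ∧ Char.ofNat c.toNat ≤ 'z' ∧ ((Char.ofNat c.toNat).toNat : Int) = c := by decide

theorem pvPad_shape {i : Int} (hi : i ∈ PySem.List.pyRange 0 100 1) :
    ∃ b d, pvPad2 i = [b, d] ∧ '0' ≤ b ∧ b ≤ '9' ∧ '0' ≤ d ∧ d ≤ '9' ∧
      ((b.toNat : Int) - 48) * 10 + ((d.toNat : Int) - 48) = i := by
  have h := pvPad_ok i hi
  match hs : pvPad2 i with
  | [] => rw [hs] at h; simp [pvPadOK] at h
  | [x] => rw [hs] at h; simp [pvPadOK] at h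
  | x :: y :: z :: t => rw [hs] at h; simp [pvPadOK] at h
  | [b, d] =>
      rw [hs] at h
      simp only [pvPadOK, Bool.and_eq_true, decide_eq_true_eq, beq_iff_eq] at h
      exact ⟨b, d, rfl, h.1.1.1.1, h.1.1.1.2, h.1.1.2, h.1.2, h.2⟩

theorem pvPad_eq {i : Int} (hi : i ∈ PySem.List.pyRange 0 100 1) {b d : Char}
    (hb0 : '0' ≤ b) (hb9 : b ≤ '9') (hd0 : '0' ≤ d) (hd9 : d ≤ '9')
    (hv : ((b.toNat : Int) - 48) * 10 + ((d.toNat : Int) - 48) = i) :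
    pvPad2 i = [b, d] := by
  obtain ⟨b', d', hs, hb0', hb9', hd0', hd9', hv'⟩ := pvPad_shape hi
  have h1 := pv_ge_48 hb0; have h2 := pv_le_57 hb9
  have h3 := pv_ge_48 hd0; have h4 := pv_le_57 hd9
  have h5 := pv_ge_48 hb0'; have h6 := pv_le_57 hb9'
  have h7 := pv_ge_48 hd0'; have h8 := pv_le_57 hd9'
  have hb : b'.toNat = b.toNat := by omega
  have hd : d'.toNat = d.toNat := by omega
  rw [hs, pv_char_eq_of_toNat_eq hb, pv_char_eq_of_toNat_eq hd]

theorem pvInner_none {pin : List Char} {i : Int} {L : List Int}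
    (h : ∀ c ∈ L, pin ≠ pvCand i c) (count : Int) :
    pvInner pin i count L = Sum.inr (count + L.length) := by
  induction L generalizing count with
  | nil => simp [pvInner]
  | cons c rest ih =>
      have hne := h c (List.mem_cons_self ..)
      simp only [pvInner, if_neg hne]
      rw [ih (fun x hx => h x (List.mem_cons_of_mem _ hx))]
      congr 1
      simp; omega

theorem pvInner_found {pin : List Char} {i : Int} {L1 : List Int} {c0 : Int} (L2 : List Int)
    (h1 : ∀ c ∈ L1, pin ≠ pvCand i c) (h2 : pin = pvCand i c0) (count : Int) :
    pvInner pin i count (L1 ++ c0 :: L2) = Sum.inl (count + L1.length + 1) := by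
  induction L1 generalizing count with
  | nil => simp [pvInner, if_pos h2]
  | cons c rest ih =>
      have hne := h1 c (List.mem_cons_self ..)
      simp only [List.cons_append, pvInner, if_neg hne]
      rw [ih (fun x hx => h1 x (List.mem_cons_of_mem _ hx))]
      congr 1
      simp; omega

theorem pvOuter_append_none {pin : List Char} {L1 : List Int} (L2 : List Int)
    (h : ∀ i ∈ L1, ∀ c ∈ PySem.List.pyRange 97 123 1, pin ≠ pvCand i c) (count : Int) :
    pvOuter pin count (L1 ++ L2) = pvOuter pin (count + 26 * L1.length) L2 := by
  induction L1 generalizing count with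
  | nil => simp
  | cons i rest ih =>
      have hnone := pvInner_none (h i (List.mem_cons_self ..)) count
      simp only [List.cons_append, pvOuter, hnone]
      rw [ih (fun x hx => h x (List.mem_cons_of_mem _ hx))]
      congr 1
      simp [PySem.List.length_pyRange_one]; omega

theorem pvOuter_none {pin : List Char} {L : List Int}
    (h : ∀ i ∈ L, ∀ c ∈ PySem.List.pyRange 97 123 1, pin ≠ pvCand i c) (count : Int) :
    pvOuter pin count L = count + 26 * L.length := by
  have := pvOuter_append_none (pin := pin) [] h count
  simp only [List.append_nil] at this
  rw [this]; simp [pvOuter]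

-- any candidate the loops test is a valid letter+digit+digit triple
theorem pvCand_shape {i c : Int} (hi : i ∈ PySem.List.pyRange 0 100 1)
    (hc : c ∈ PySem.List.pyRange 97 123 1) :
    ∃ a b d, pvCand i c = [a, b, d] ∧ 'a' ≤ a ∧ a ≤ 'z' ∧ '0' ≤ b ∧ b ≤ '9' ∧ '0' ≤ d ∧ d ≤ '9' ∧
      ((b.toNat : Int) - 48) * 10 + ((d.toNat : Int) - 48) = i ∧ ((a.toNat : Int)) = c := by
  obtain ⟨b, d, hs, hb0, hb9, hd0, hd9, hv⟩ := pvPad_shape hi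
  obtain ⟨ha1, ha2, ha3⟩ := pvChr_ok c hc
  exact ⟨Char.ofNat c.toNat, b, d, by rw [pvCand, hs], ha1, ha2, hb0, hb9, hd0, hd9, hv, ha3⟩

-- ===== VERDICT (by name: the statement is the Claim_ definition above) =====
theorem cracking_the_code_spec : Claim_equal_cracking_the_code := by
  intro pin _
  unfold Spec_cracking_the_code cracking_the_code cracking_the_code_alt
  by_cases hform : ∃ a b d, pin.toList = [a, b, d] ∧ 'a' ≤ a ∧ a ≤ 'z' ∧ '0' ≤ b ∧ b ≤ '9' ∧ '0' ≤ d ∧ d ≤ '9'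
  · obtain ⟨a, b, d, hcs, ha1, ha2, hb0, hb9, hd0, hd9⟩ := hform
    have hb0' := pv_ge_48 hb0; have hb9' := pv_le_57 hb9
    have hd0' := pv_ge_48 hd0; have hd9' := pv_le_57 hd9
    have ha1' := pv_ge_97 ha1; have ha2' := pv_le_122 ha2
    obtain ⟨i0, hi0⟩ : ∃ i0 : Int, i0 = ((b.toNat : Int) - 48) * 10 + ((d.toNat : Int) - 48) :=
      ⟨_, rfl⟩
    obtain ⟨c0, hc0⟩ : ∃ c0 : Int, c0 = (a.toNat : Int) := ⟨_, rfl⟩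
    have hi0b : 0 ≤ i0 ∧ i0 < 100 := by omega
    have hc0b : 97 ≤ c0 ∧ c0 < 123 := by omega
    have hi0r : i0 ∈ PySem.List.pyRange 0 100 1 := by
      rw [PySem.List.mem_pyRange_one]; omega
    -- A's unique match is at (i0, c0)
    have hmatch : pin.toList = pvCand i0 c0 := by
      have hch : Char.ofNat c0.toNat = a := by rw [hc0]; simp [Char.ofNat_toNat]
      rw [pvCand, pvPad_eq hi0r hb0 hb9 hd0 hd9 hi0.symm, hch, hcs]
    have hprefix : ∀ i ∈ PySem.List.pyRange 0 i0 1, ∀ c ∈ PySem.List.pyRange 97 123 1,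
        pin.toList ≠ pvCand i c := by
      intro i hi c hc heq
      rw [PySem.List.mem_pyRange_one] at hi
      have hir : i ∈ PySem.List.pyRange 0 100 1 := by
        rw [PySem.List.mem_pyRange_one]; omega
      obtain ⟨a', b', d', hsh, _, _, _, _, _, _, hvx, _⟩ := pvCand_shape hir hc
      rw [heq, hsh] at hcs
      injection hcs with e1 hcs; injection hcs with e2 hcs; injection hcs with e3 _
      rw [e2, e3] at hvx
      omega
    have hinprefix : ∀ c ∈ PySem.List.pyRange 97 c0 1, pin.toList ≠ pvCand i0 c := by
      intro c hc heq
      rw [PySem.List.mem_pyRange_one] at hc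
      have hcr : c ∈ PySem.List.pyRange 97 123 1 := by
        rw [PySem.List.mem_pyRange_one]; omega
      obtain ⟨a', b', d', hsh, _, _, _, _, _, _, _, hax⟩ := pvCand_shape hi0r hcr
      rw [heq, hsh] at hcs
      injection hcs with e1 _
      rw [e1] at hax
      omega
    have hsplit : PySem.List.pyRange 97 123 1 =
        PySem.List.pyRange 97 c0 1 ++ c0 :: PySem.List.pyRange (c0 + 1) 123 1 := by
      rw [← PySem.List.pyRange_one_cons (by omega)]
      exact PySem.List.pyRange_one_append 97 c0 123 (by omega) (by omega)
    rw [PySem.List.pyRange_one_append 0 i0 100 (by omega) (by omega),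
        pvOuter_append_none _ hprefix,
        PySem.List.pyRange_one_cons (by omega : i0 < 100)]
    simp only [pvOuter]
    rw [hsplit, pvInner_found _ hinprefix hmatch, hcs]
    show (0 + 26 * ((PySem.List.pyRange 0 i0 1).length : Int)
        + ((PySem.List.pyRange 97 c0 1).length : Int) + 1 : Int)
      = if 'a' ≤ a ∧ a ≤ 'z' ∧ '0' ≤ b ∧ b ≤ '9' ∧ '0' ≤ d ∧ d ≤ '9' then
          (((b.toNat : Int) - 48) * 10 + ((d.toNat : Int) - 48)) * 26 + ((a.toNat : Int) - 96)
        else 2600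
    rw [if_pos ⟨ha1, ha2, hb0, hb9, hd0, hd9⟩]
    simp only [PySem.List.length_pyRange_one]
    omega
  · -- no match anywhere: A falls through to count = 2600 and B returns 2600
    have hnone : ∀ i ∈ PySem.List.pyRange 0 100 1, ∀ c ∈ PySem.List.pyRange 97 123 1,
        pin.toList ≠ pvCand i c := by
      intro i hi c hc heq
      obtain ⟨a', b', d', hsh, h1, h2, h3, h4, h5, h6, _, _⟩ := pvCand_shape hi hc
      exact hform ⟨a', b', d', by rw [heq, hsh], h1, h2, h3, h4, h5, h6⟩
    rw [pvOuter_none hnone]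
    match hcs : pin.toList with
    | [] => decide
    | [x] => show (0 + 26 * ((PySem.List.pyRange 0 100 1).length : Int) : Int) = 2600; decide
    | [x, y] => show (0 + 26 * ((PySem.List.pyRange 0 100 1).length : Int) : Int) = 2600; decide
    | x :: y :: z :: w :: t =>
        show (0 + 26 * ((PySem.List.pyRange 0 100 1).length : Int) : Int) = 2600; decide
    | [a, b, d] =>
        have hc : ¬('a' ≤ a ∧ a ≤ 'z' ∧ '0' ≤ b ∧ b ≤ '9' ∧ '0' ≤ d ∧ d ≤ '9') :=
          fun hv => hform ⟨a, b, d, hcs, hv⟩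
        show (0 + 26 * ((PySem.List.pyRange 0 100 1).length : Int) : Int)
          = if 'a' ≤ a ∧ a ≤ 'z' ∧ '0' ≤ b ∧ b ≤ '9' ∧ '0' ≤ d ∧ d ≤ '9' then
              (((b.toNat : Int) - 48) * 10 + ((d.toNat : Int) - 48)) * 26 + ((a.toNat : Int) - 96)
            else 2600
        rw [if_neg hc]
        decide
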